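-- pv_equiv track=rewrite | github.com/vanessacezarn/MaratonaDeProgramacao | encontro8/polinomio.py | collatz_polinomio
-- ===== SOURCE A (Python) =====
-- def collatz_polinomio(polinomio):
--     """
--     polinomio é representado como um conjunto de expoentes.
--     Exemplo: {0,1,3} representa P(x) = x^3 + x + 1
--     """
--     passos = 0
--
--     while polinomio != {0}:  # até P(x) = 1
--         if 0 in polinomio:  # tem termo constante
--             novo = set()
--             # P(x) * x → soma 1 no expoente
--             for exp in polinomio:
--                 novo.add(exp + 1)
--             # Soma P(x)
--             for exp in polinomio:
--                 if exp in novo: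
--                     novo.remove(exp)  # coeficiente virou 2 → descarta
--                 else:
--                     novo.add(exp)
--             # Soma 1 → adiciona expoente 0
--             if 0 in novo:
--                 novo.remove(0)  # coeficiente virou 2 → descarta
--             else:
--                 novo.add(0)
--             polinomio = novo
--         else:  # divide por x
--             polinomio = {exp - 1 for exp in polinomio}
--
--         passos += 1
--
--     return passos
-- ===== SOURCE B (Python) =====
-- def collatz_polinomio(polinomio):
--     # Run-length-compressed trajectory over an integer bitmask:
--     # one loop iteration per ODD state. A whole run of t "divide by x" steps
--     # is collapsed into one shift by the trailing-zero count t, and the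
--     # odd step P -> P*(x+1)+1 (which always produces a multiple of x) fused
--     # with its forced division by x is the Gray-code map m ^ (m >> 1),
--     # counted as 2 steps. The intermediate states A visits are never built.
--     m = 0
--     for e in polinomio:
--         m |= 1 << e
--     passos = 0
--     while m != 1:
--         t = (m & -m).bit_length() - 1   # 2-adic valuation: run of even steps
--         m >>= t
--         passos += t
--         if m != 1:
--             m ^= m >> 1                 # fused odd step + forced halving
--             passos += 2
--     return passos
-- ===== Notes on version B (the rewrite author's own statement) =====
-- stated objective: faster
-- what changed: B compresses the trajectory: the polynomial is an integer bitmask, a whole run of t divide-by-x steps is collapsed into one shift by the trailing-zero count, and the odd step fused with its always-forced halving becomes the Gray-code map m ^ (m >> 1); B iterates once per odd state instead of once per step and never builds A's per-step exponent sets.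
-- outside the precondition, e.g. on collatz_polinomio(set()): A does not finish within the time limit, B raises ValueError; on collatz_polinomio({0, -1}): A does not finish within the time limit, B raises ValueError
import Mathlib
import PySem

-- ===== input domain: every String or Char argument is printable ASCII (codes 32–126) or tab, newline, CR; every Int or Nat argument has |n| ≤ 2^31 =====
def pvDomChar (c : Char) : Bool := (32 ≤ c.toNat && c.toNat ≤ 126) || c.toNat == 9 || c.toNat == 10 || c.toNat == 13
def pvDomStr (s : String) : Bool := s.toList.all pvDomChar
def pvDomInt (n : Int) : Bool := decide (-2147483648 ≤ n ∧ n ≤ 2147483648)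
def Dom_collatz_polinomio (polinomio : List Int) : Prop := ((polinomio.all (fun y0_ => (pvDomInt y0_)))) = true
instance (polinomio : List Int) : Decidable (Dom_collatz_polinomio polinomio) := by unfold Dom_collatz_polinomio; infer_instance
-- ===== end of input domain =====

-- B stores the polynomial as an integer bitmask and compresses the trajectory:
-- one iteration per odd state (even-step runs collapsed into one shift, the odd
-- step fused with its forced halving into the Gray map m ^ (m >> 1)).
-- Python's while loop has no syntactic bound, so both loops are ported with the
-- same (astronomically large) fuel and the proof aligns their fuel accounting.

-- ===== PORT A =====
-- odd step of A: novo = {e+1 | e in P}, then symmetric-difference with P, then toggle 0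
-- (Python's `novo.remove`, guarded by `exp in novo`, is exactly `discard`)
def pvOddStep (P : PySem.Set Int) : PySem.Set Int :=
  let novo : PySem.Set Int :=
    P.foldl (fun n e => PySem.Set.add n (e + 1)) PySem.Set.empty
  let novo :=
    P.foldl (fun n e =>
      if PySem.Set.contains n e then PySem.Set.discard n e else PySem.Set.add n e) novo
  if PySem.Set.contains novo 0 then PySem.Set.discard novo 0 else PySem.Set.add novo 0

def pvLoopA : Nat → PySem.Set Int → Int → Int
  | 0, _, passos => passos
  | fuel + 1, P, passos =>
    if PySem.Set.equal P (PySem.Set.ofList [0]) then passos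
    else
      pvLoopA fuel
        (if PySem.Set.contains P 0 then pvOddStep P
         else PySem.Set.ofList (P.map (fun e => e - 1)))
        (passos + 1)

def collatz_polinomio (polinomio : List Int) : Int :=
  pvLoopA (2 ^ 64) (PySem.Set.ofList polinomio) 0

-- ===== PORT B =====
-- `1 << e`: e.toNat is exact for 0 ≤ e (Python raises ValueError on e < 0, excluded by Pre_)
def pvMaskOf (polinomio : List Int) : Nat :=
  polinomio.foldl (fun m e => m ||| (1 <<< e.toNat)) 0

-- Source B's `(m & -m).bit_length() - 1` (trailing-zero count, exact for m > 0),
-- ported as the obvious recursion on halving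
def pvTz (m : Nat) : Nat :=
  if m % 2 = 1 ∨ m = 0 then 0 else pvTz (m / 2) + 1
decreasing_by omega

-- Source B's while loop; fuel consumption matches the number of unit steps of the
-- original map that one batched iteration represents (t shifts, then 2 for the
-- fused Gray step); the `fuel ≤ t` / `f' = 1` branches are totality guards only
def pvLoopBat : Nat → Nat → Int → Int
  | fuel, m, passos =>
    if m = 1 then passos
    else
      let t := pvTz m
      if h : fuel ≤ t then passos + (fuel : Int)
      else
        let m' := m >>> t
        let f' := fuel - t
        let p' := passos + (t : Int)
        if m' = 1 then p'
        else if f' = 1 then p' + 1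
        else pvLoopBat (f' - 2) (m' ^^^ (m' >>> 1)) (p' + 2)
decreasing_by omega

def collatz_polinomio_alt (polinomio : List Int) : Int :=
  pvLoopBat (2 ^ 64) (pvMaskOf polinomio) 0

-- ===== PRECONDITION & SPEC =====
-- Pre_ excludes the empty set (A's while loop never terminates there) and negative
-- exponents (the set's minimum survives the odd step and only decreases on the even
-- step, so A never reaches {0}: divergence). On both regions A returns no value.
def Pre_collatz_polinomio (polinomio : List Int) : Prop :=
  polinomio ≠ [] ∧ ∀ e ∈ polinomio, 0 ≤ e
instance (polinomio : List Int) : Decidable (Pre_collatz_polinomio polinomio) := by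
  unfold Pre_collatz_polinomio; infer_instance
def pvWitness_collatz_polinomio : List Int := [0, 1, 3]

def Spec_collatz_polinomio (polinomio : List Int) (out : Int) : Prop := out = collatz_polinomio_alt polinomio
instance (polinomio : List Int) (out : Int) : Decidable (Spec_collatz_polinomio polinomio out) := by unfold Spec_collatz_polinomio; infer_instance

-- ===== CLAIM (what is proved, stated in full; the proofs are below) =====
def Claim_equal_collatz_polinomio : Prop := ∀ (polinomio : List Int), Dom_collatz_polinomio polinomio → Pre_collatz_polinomio polinomio → Spec_collatz_polinomio polinomio (collatz_polinomio polinomio)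

-- ===== LEMMAS AND PROOFS =====

-- Proof-side reference loop: the original unit-step map on the bitmask.
-- A is simulated against it step for step; B's batched loop is then proved
-- equal to it by pure Nat bit arithmetic.
def pvUnit : Nat → Nat → Int → Int
  | 0, _, passos => passos
  | fuel + 1, m, passos =>
    if m == 1 then passos
    else pvUnit fuel (if m &&& 1 == 1 then m ^^^ (m <<< 1) ^^^ 1 else m >>> 1) (passos + 1)

-- Simulation relation between A's set state and the bitmask state:
-- bit n of the mask is set iff the exponent n is in the set (and the set is nonnegative).
def pvRel (P : PySem.Set Int) (m : Nat) : Prop :=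
  (∀ e ∈ P, 0 ≤ e) ∧ ∀ n : Nat, ((n : Int) ∈ P ↔ m.testBit n)

theorem pvTestBit_one (n : Nat) : (1 : Nat).testBit n = decide (n = 0) := by
  cases n with
  | zero => decide
  | succ k => simp [Nat.testBit_succ]

theorem pvMask_foldl (l : List Int) (m0 : Nat) (n : Nat) :
    (l.foldl (fun m e => m ||| (1 <<< e.toNat)) m0).testBit n
      = (m0.testBit n || decide (∃ e ∈ l, e.toNat = n)) := by
  induction l generalizing m0 with
  | nil => simp
  | cons a l ih =>
    rw [List.foldl_cons, ih, Nat.testBit_or]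
    simp only [Nat.one_shiftLeft, Nat.testBit_two_pow, List.mem_cons]
    by_cases h : a.toNat = n <;> by_cases h2 : ∃ e ∈ l, e.toNat = n <;> simp [h, h2]

theorem pvRel_ofList (l : List Int) (h : ∀ e ∈ l, 0 ≤ e) :
    pvRel (PySem.Set.ofList l) (pvMaskOf l) := by
  constructor
  · intro e he; exact h e ((PySem.Set.mem_ofList l e).1 he)
  · intro n
    rw [PySem.Set.mem_ofList, pvMaskOf, pvMask_foldl]
    simp only [Nat.zero_testBit, Bool.false_or, decide_eq_true_eq]
    constructor
    · intro hn; exact ⟨n, hn, Int.toNat_natCast n⟩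
    · rintro ⟨e, he, rfl⟩
      have := h e he
      rwa [Int.toNat_of_nonneg this]

theorem pvRel_exit {P : PySem.Set Int} {m : Nat} (hR : pvRel P m) :
    PySem.Set.equal P (PySem.Set.ofList [0]) = (m == 1) := by
  rw [Bool.eq_iff_iff, PySem.Set.equal_iff, beq_iff_eq]
  constructor
  · intro h
    apply Nat.eq_of_testBit_eq
    intro n
    have hm := hR.2 n
    rw [h ((n : Int))] at hm
    simp only [PySem.Set.ofList, PySem.Set.add, PySem.Set.empty, List.foldl] at hm
    rw [pvTestBit_one, Bool.eq_iff_iff, decide_eq_true_eq, ← hm]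
    constructor
    · intro hx; simp at hx; omega
    · intro hx; simp; omega
  · intro h x
    subst h
    constructor
    · intro hx
      have h0 : 0 ≤ x := hR.1 x hx
      have := (hR.2 x.toNat).1 (by rwa [Int.toNat_of_nonneg h0])
      rw [pvTestBit_one, decide_eq_true_eq] at this
      simp [PySem.Set.ofList]; omega
    · intro hx
      simp [PySem.Set.ofList] at hx
      subst hx
      exact (hR.2 0).2 (by rw [pvTestBit_one]; decide)

theorem pvRel_parity {P : PySem.Set Int} {m : Nat} (hR : pvRel P m) :
    PySem.Set.contains P 0 = (m &&& 1 == 1) := by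
  rw [Bool.eq_iff_iff, PySem.Set.contains_iff, beq_iff_eq, Nat.and_one_is_mod]
  have := hR.2 0
  rw [Nat.testBit_zero, decide_eq_true_eq] at this
  exact_mod_cast this

theorem pvRel_even {P : PySem.Set Int} {m : Nat} (hR : pvRel P m)
    (h0 : (0 : Int) ∉ P) : pvRel (PySem.Set.ofList (P.map (fun e => e - 1))) (m >>> 1) := by
  constructor
  · intro x hx
    rw [PySem.Set.mem_ofList, List.mem_map] at hx
    obtain ⟨e, he, rfl⟩ := hx
    have h1 := hR.1 e he
    have : e ≠ 0 := fun h => h0 (h ▸ he)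
    omega
  · intro n
    rw [PySem.Set.mem_ofList, List.mem_map, Nat.testBit_shiftRight]
    rw [← hR.2 (1 + n)]
    constructor
    · rintro ⟨e, he, hh⟩
      have : e = (1 + n : Nat) := by push_cast; omega
      exact this ▸ he
    · intro h
      exact ⟨((1 + n : Nat) : Int), h, by push_cast; ring⟩

-- one iteration of A's second inner loop ('toggle' membership of exp in novo)
theorem pvMem_toggle (s : PySem.Set Int) (a x : Int) :
    x ∈ (if PySem.Set.contains s a then PySem.Set.discard s a else PySem.Set.add s a)
      ↔ ((x ∈ s ∧ x ≠ a) ∨ (x ∉ s ∧ x = a)) := by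
  by_cases h : a ∈ s
  · rw [if_pos ((PySem.Set.contains_iff s a).2 h), PySem.Set.mem_discard]
    constructor
    · exact fun h1 => Or.inl h1
    · rintro (h1 | ⟨h1, rfl⟩)
      · exact h1
      · exact absurd h h1
  · rw [if_neg (fun hc => h ((PySem.Set.contains_iff s a).1 hc)), PySem.Set.mem_add]
    constructor
    · rintro (h1 | rfl)
      · exact Or.inl ⟨h1, fun he => h (he ▸ h1)⟩
      · exact Or.inr ⟨h, rfl⟩
    · rintro (⟨h1, _⟩ | ⟨_, rfl⟩)
      · exact Or.inl h1
      · exact Or.inr rfl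

theorem pvNodup_toggle (s : PySem.Set Int) (a : Int) (hs : s.Nodup) :
    (if PySem.Set.contains s a then PySem.Set.discard s a else PySem.Set.add s a).Nodup := by
  split
  · exact PySem.Set.nodup_discard s a hs
  · exact PySem.Set.nodup_add s a hs

-- A's second inner loop over the (duplicate-free) set computes the symmetric difference
theorem pvMem_foldl_toggle (l : List Int) (s : PySem.Set Int) (hl : l.Nodup) (hs : s.Nodup)
    (x : Int) :
    x ∈ l.foldl (fun n e =>
        if PySem.Set.contains n e then PySem.Set.discard n e else PySem.Set.add n e) s
      ↔ ((x ∈ s ∧ x ∉ l) ∨ (x ∉ s ∧ x ∈ l)) := by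
  induction l generalizing s with
  | nil => simp
  | cons a l ih =>
    rw [List.foldl_cons,
      ih _ (List.Nodup.of_cons hl) (pvNodup_toggle s a hs), pvMem_toggle]
    have ha : a ∉ l := (List.nodup_cons.1 hl).1
    simp only [List.mem_cons]
    by_cases h1 : x ∈ s <;> by_cases h2 : x = a <;> by_cases h3 : x ∈ l <;>
      simp [h1, h2, h3] <;> (try subst h2) <;> tauto

theorem pvNodup_foldl_toggle (l : List Int) (s : PySem.Set Int) (hs : s.Nodup) :
    (l.foldl (fun n e =>
        if PySem.Set.contains n e then PySem.Set.discard n e else PySem.Set.add n e) s).Nodup := by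
  induction l generalizing s with
  | nil => exact hs
  | cons a l ih => exact ih _ (pvNodup_toggle s a hs)

theorem pvRel_odd {P : PySem.Set Int} {m : Nat} (hN : P.Nodup) (hR : pvRel P m) :
    pvRel (pvOddStep P) (m ^^^ (m <<< 1) ^^^ 1) := by
  have hS1mem : ∀ x, x ∈ (P.foldl (fun n e => PySem.Set.add n (e + 1)) PySem.Set.empty)
      ↔ ∃ e ∈ P, x = e + 1 := by
    intro x
    rw [PySem.Set.mem_foldl_add]
    simp [PySem.Set.empty]
  have hS1nodup : (P.foldl (fun n e => PySem.Set.add n (e + 1)) PySem.Set.empty).Nodup := by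
    rw [← PySem.Set.update_map_eq_foldl_add]
    exact PySem.Set.nodup_update _ _ (by simp [PySem.Set.empty])
  rw [pvOddStep]
  constructor
  · intro x hx
    rw [pvMem_toggle] at hx
    rcases hx with ⟨hx, _⟩ | ⟨_, rfl⟩
    · rw [pvMem_foldl_toggle _ _ hN hS1nodup] at hx
      rcases hx with ⟨hx, _⟩ | ⟨_, hx⟩
      · rw [hS1mem] at hx
        obtain ⟨e, he, rfl⟩ := hx
        have := hR.1 e he
        omega
      · exact hR.1 x hx
    · exact le_refl 0
  · intro n
    have hS1 : ((n : Int) ∈ (P.foldl (fun n e => PySem.Set.add n (e + 1)) PySem.Set.empty))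
        ↔ (1 ≤ n ∧ m.testBit (n - 1)) := by
      rw [hS1mem]
      constructor
      · rintro ⟨e, he, heq⟩
        have hnn := hR.1 e he
        have h1 : 1 ≤ n := by omega
        have he' : e = ((n - 1 : Nat) : Int) := by omega
        exact ⟨h1, (hR.2 (n - 1)).1 (he' ▸ he)⟩
      · rintro ⟨h1, hb⟩
        exact ⟨((n - 1 : Nat) : Int), (hR.2 (n - 1)).2 hb, by omega⟩
    rw [pvMem_toggle, pvMem_foldl_toggle _ _ hN hS1nodup, hS1, hR.2 n,
      Nat.testBit_xor, Nat.testBit_xor, Nat.testBit_shiftLeft, pvTestBit_one]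
    have hz : ((n : Int) = 0) ↔ (n = 0) := by omega
    rw [hz]
    by_cases h1 : m.testBit n <;> by_cases h2 : m.testBit (n - 1) <;>
      by_cases h3 : n = 0 <;> subst_eqs <;> simp_all

theorem pvNodup_odd {P : PySem.Set Int} : (pvOddStep P).Nodup := by
  rw [pvOddStep]
  apply pvNodup_toggle
  apply pvNodup_foldl_toggle
  rw [← PySem.Set.update_map_eq_foldl_add]
  exact PySem.Set.nodup_update _ _ (by simp [PySem.Set.empty])

theorem pvLoopA_eq_unit (fuel : Nat) (P : PySem.Set Int) (m : Nat) (passos : Int)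
    (hN : P.Nodup) (hR : pvRel P m) : pvLoopA fuel P passos = pvUnit fuel m passos := by
  induction fuel generalizing P m passos with
  | zero => rfl
  | succ fuel ih =>
    rw [pvLoopA, pvUnit, pvRel_exit hR, pvRel_parity hR]
    by_cases hx : (m == 1) = true
    · rw [if_pos hx, if_pos hx]
    · rw [if_neg hx, if_neg hx]
      by_cases hp : (m &&& 1 == 1) = true
      · rw [if_pos hp, if_pos hp]
        exact ih _ _ _ pvNodup_odd (pvRel_odd hN hR)
      · rw [if_neg hp, if_neg hp]
        have h0 : (0 : Int) ∉ P := by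
          rw [← PySem.Set.contains_iff, pvRel_parity hR]; simpa using hp
        exact ih _ _ _ (PySem.Set.nodup_ofList _) (pvRel_even hR h0)

-- ===== bitmask side: the batched loop equals the unit-step loop =====

theorem pvTz_odd {m : Nat} (h : m % 2 = 1) : pvTz m = 0 := by
  rw [pvTz]; simp [h]

theorem pvTz_spec (m : Nat) (hm : 1 ≤ m) :
    (m >>> pvTz m) % 2 = 1 ∧ (m >>> pvTz m) <<< pvTz m = m := by
  induction m using Nat.strong_induction_on with
  | _ m ih =>
    by_cases h : m % 2 = 1
    · rw [pvTz_odd h]; simpa using h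
    · have h0 : m ≠ 0 := by omega
      have hrec : pvTz m = pvTz (m / 2) + 1 := by rw [pvTz]; simp [h, h0]
      have h2 : 1 ≤ m / 2 := by omega
      obtain ⟨ho, hs⟩ := ih (m / 2) (by omega) h2
      constructor
      · rw [hrec]
        simpa [Nat.shiftRight_succ_inside] using ho
      · rw [hrec]
        have e1 : m >>> (pvTz (m / 2) + 1) = (m / 2) >>> pvTz (m / 2) := by
          simp [Nat.shiftRight_succ_inside]
        rw [e1, Nat.shiftLeft_succ, hs]
        omega

-- unfolding pvUnit through a run of t even steps
theorem pvUnit_strip (t : Nat) (fuel : Nat) (q : Nat) (passos : Int)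
    (h1 : 1 ≤ q) :
    pvUnit fuel (q <<< t) passos =
      if t ≤ fuel then pvUnit (fuel - t) q (passos + (t : Int))
      else passos + (fuel : Int) := by
  induction t generalizing fuel passos with
  | zero => simp
  | succ t ih =>
    cases fuel with
    | zero =>
      rw [pvUnit]; simp
    | succ f =>
      have hne : (q <<< (t + 1)) ≠ 1 := by
        have : 2 ≤ q <<< (t + 1) := by
          rw [Nat.shiftLeft_eq]
          calc 2 = 1 * 2 ^ 1 := by norm_num
          _ ≤ q * 2 ^ (t + 1) := by
            apply Nat.mul_le_mul h1
            exact Nat.pow_le_pow_right (by norm_num) (by omega)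
        omega
      have heven : ((q <<< (t + 1)) &&& 1 == 1) = false := by
        rw [Nat.and_one_is_mod]
        have : (q <<< (t + 1)) % 2 = 0 := by
          rw [Nat.shiftLeft_eq]
          have : 2 ∣ q * 2 ^ (t + 1) := Dvd.dvd.mul_left (dvd_pow_self 2 (by omega)) q
          omega
        simp [this]
      rw [pvUnit]
      simp only [beq_iff_eq, hne, if_false, heven, Bool.false_eq_true, if_false]
      have hsh : (q <<< (t + 1)) >>> 1 = q <<< t := by
        rw [Nat.shiftLeft_succ, Nat.shiftRight_succ]
        omega
      rw [hsh, ih f (passos + 1)]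
      by_cases ht : t ≤ f
      · rw [if_pos ht, if_pos (by omega)]
        have : f - t = f + 1 - (t + 1) := by omega
        rw [this]
        congr 1
        push_cast; ring
      · rw [if_neg ht, if_neg (by omega)]
        push_cast; ring

-- the odd step on an odd mask yields twice the Gray map
theorem pvOdd_eq_gray {q : Nat} (hq : q % 2 = 1) :
    q ^^^ (q <<< 1) ^^^ 1 = (q ^^^ (q >>> 1)) <<< 1 := by
  apply Nat.eq_of_testBit_eq
  intro i
  simp only [Nat.testBit_xor, Nat.testBit_shiftLeft, Nat.testBit_shiftRight, pvTestBit_one]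
  cases i with
  | zero =>
    have : q.testBit 0 = true := by
      rw [Nat.testBit_zero]; simp [hq]
    simp [this]
  | succ k =>
    have h1 : (1 ≤ k + 1) = True := by simp
    simp only [Nat.succ_sub_one]
    by_cases hk : q.testBit (k + 1) <;> by_cases hk2 : q.testBit k <;>
      simp [hk, hk2, Nat.add_comm 1 k]

theorem pvGray_pos {q : Nat} (h1 : 1 ≤ q) : 1 ≤ q ^^^ (q >>> 1) := by
  by_contra h
  have h0 : q ^^^ (q >>> 1) = 0 := by omega
  have : q = q >>> 1 := Nat.eq_of_xor_eq_zero h0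
  have : q >>> 1 = q / 2 := Nat.shiftRight_eq_div_pow q 1 ▸ by norm_num
  omega

theorem pvUnit_one (f : Nat) (p : Int) : pvUnit f 1 p = p := by
  cases f with
  | zero => rfl
  | succ f => rw [pvUnit]; simp

theorem pvUnit_gray (f : Nat) (q : Nat) (p : Int)
    (ho : q % 2 = 1) (h1 : q ≠ 1) (hq : 1 ≤ q) :
    pvUnit (f + 2) q p = pvUnit f (q ^^^ (q >>> 1)) (p + 2) := by
  have hodd : (q &&& 1 == 1) = true := by
    rw [Nat.and_one_is_mod]; simp [ho]
  rw [pvUnit]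
  simp only [beq_iff_eq, h1, if_false, hodd, if_true]
  rw [pvOdd_eq_gray ho]
  set g := q ^^^ (q >>> 1) with hg
  have hg1 : 1 ≤ g := pvGray_pos hq
  have hval : g <<< 1 = 2 * g := by rw [Nat.shiftLeft_eq]; ring
  have hne : (g <<< 1) ≠ 1 := by omega
  have heven : ((g <<< 1) &&& 1 == 1) = false := by
    rw [Nat.and_one_is_mod]
    have : (g <<< 1) % 2 = 0 := by omega
    simp [this]
  rw [pvUnit]
  simp only [beq_iff_eq, hne, if_false, heven, Bool.false_eq_true, if_false]
  have hsh : (g <<< 1) >>> 1 = g := by omega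
  rw [hsh]
  congr 1
  ring

theorem pvUnit_eq_bat (fuel : Nat) (m : Nat) (passos : Int) (hm : 1 ≤ m) :
    pvUnit fuel m passos = pvLoopBat fuel m passos := by
  induction fuel using Nat.strong_induction_on generalizing m passos with
  | _ fuel ih =>
    rw [pvLoopBat]
    by_cases h1 : m = 1
    · subst h1
      simp only [↓reduceIte]
      exact pvUnit_one fuel passos
    · rw [if_neg h1]
      obtain ⟨ho, hs⟩ := pvTz_spec m hm
      set t := pvTz m with htdef
      set q := m >>> t with hqdef
      have hq1 : 1 ≤ q := by
        rcases Nat.eq_zero_or_pos q with h | h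
        · rw [h] at ho; omega
        · exact h
      have hrw : pvUnit fuel m passos = pvUnit fuel (q <<< t) passos := by rw [hs]
      rw [hrw, pvUnit_strip t fuel q passos hq1]
      by_cases hlt : t ≤ fuel
      · rw [if_pos hlt]
        by_cases hft : fuel ≤ t
        · rw [dif_pos hft]
          have hft' : fuel = t := le_antisymm hft hlt
          subst hft'
          simp only [Nat.sub_self]
          rfl
        · rw [dif_neg hft]
          simp only []
          by_cases hq1' : q = 1
          · rw [if_pos hq1']
            rw [hq1']
            exact pvUnit_one _ _
          · rw [if_neg hq1']
            by_cases hf1 : fuel - t = 1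
            · rw [if_pos hf1, hf1]
              have hodd : (q &&& 1 == 1) = true := by
                rw [Nat.and_one_is_mod]; simp [ho]
              rw [pvUnit]
              simp only [beq_iff_eq, hq1', if_false, hodd, if_true]
              rfl
            · rw [if_neg hf1]
              obtain ⟨f2, hf2⟩ : ∃ f2, fuel - t = f2 + 2 := by
                refine ⟨fuel - t - 2, by omega⟩
              rw [hf2, pvUnit_gray f2 q _ ho hq1' hq1]
              have hnorm : f2 + 2 - 2 = f2 := by omega
              rw [hnorm, ← hqdef]
              exact ih f2 (by omega) _ _ (pvGray_pos hq1)
      · rw [if_neg hlt, dif_pos (by omega)]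

-- ===== VERDICT (by name: the statement is the Claim_ definition above) =====
theorem collatz_polinomio_spec : Claim_equal_collatz_polinomio := by
  intro l _ hPre
  unfold Spec_collatz_polinomio collatz_polinomio collatz_polinomio_alt
  obtain ⟨e0, rest, hl⟩ : ∃ e0 rest, l = e0 :: rest := by
    cases l with
    | nil => exact absurd rfl hPre.1
    | cons a r => exact ⟨a, r, rfl⟩
  have hbit : (pvMaskOf l).testBit e0.toNat = true := by
    rw [pvMaskOf, pvMask_foldl]
    simp only [Nat.zero_testBit, Bool.false_or, decide_eq_true_eq]
    exact ⟨e0, by rw [hl]; exact List.mem_cons_self .., rfl⟩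
  have hm : 1 ≤ pvMaskOf l := by
    rcases Nat.eq_zero_or_pos (pvMaskOf l) with h | h
    · rw [h] at hbit; simp at hbit
    · exact h
  rw [pvLoopA_eq_unit _ _ _ _ (PySem.Set.nodup_ofList l) (pvRel_ofList l hPre.2)]
  exact pvUnit_eq_bat _ _ _ hm
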